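-- pv_equiv track=rewrite | github.com/ngnam1104/Legal-RAG | utils/debug_neo4j_relations.py | analyze_verb_roots
-- ===== SOURCE A (Python) =====
-- from collections import defaultdict
--
-- def analyze_verb_roots(rel_types: list[dict]) -> dict:
--     """Nhóm các relation types theo verb root (phần trước _BY/_TO/_FROM/...)."""
--     PREPS = ["_FROM", "_WITH", "_VIA", "_IN", "_AT", "_ON", "_FOR", "_TO", "_BY"]
--     groups = defaultdict(list)
--     for item in rel_types:
--         rt = item["rel_type"]
--         stem = rt
--         for prep in PREPS:
--             if rt.endswith(prep):
--                 stem = rt[:-len(prep)]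
--                 break
--         groups[stem].append(item)
--     # Chỉ trả về nhóm có >1 variant
--     return {k: v for k, v in groups.items() if len(v) > 1}
-- ===== SOURCE B (Python) =====
-- def analyze_verb_roots(rel_types: list[dict]) -> dict:
--     """Nhóm các relation types theo verb root (phần trước _BY/_TO/_FROM/...)."""
--     PREPS = ["_FROM", "_WITH", "_VIA", "_IN", "_AT", "_ON", "_FOR", "_TO", "_BY"]
--     def stem_of(rt):
--         for prep in PREPS:
--             if rt.endswith(prep):
--                 return rt[:-len(prep)]
--         return rt
--     stems = [stem_of(item["rel_type"]) for item in rel_types]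
--     result = {}
--     for s in stems:
--         if s not in result and stems.count(s) > 1:
--             result[s] = [item for st, item in zip(stems, rel_types) if st == s]
--     return result
-- ===== Notes on version B (the rewrite author's own statement) =====
-- stated objective: alternative
-- what changed: B computes all stems up front, then builds each output group by a direct scan over the (stem, item) pairs for every first-occurring stem whose total count exceeds 1, instead of incrementally grouping all items into a defaultdict and filtering the groups afterwards.
-- outside the precondition, e.g. on analyze_verb_roots([{'x': '1'}]): A raises KeyError, B raises KeyError
import Mathlib
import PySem

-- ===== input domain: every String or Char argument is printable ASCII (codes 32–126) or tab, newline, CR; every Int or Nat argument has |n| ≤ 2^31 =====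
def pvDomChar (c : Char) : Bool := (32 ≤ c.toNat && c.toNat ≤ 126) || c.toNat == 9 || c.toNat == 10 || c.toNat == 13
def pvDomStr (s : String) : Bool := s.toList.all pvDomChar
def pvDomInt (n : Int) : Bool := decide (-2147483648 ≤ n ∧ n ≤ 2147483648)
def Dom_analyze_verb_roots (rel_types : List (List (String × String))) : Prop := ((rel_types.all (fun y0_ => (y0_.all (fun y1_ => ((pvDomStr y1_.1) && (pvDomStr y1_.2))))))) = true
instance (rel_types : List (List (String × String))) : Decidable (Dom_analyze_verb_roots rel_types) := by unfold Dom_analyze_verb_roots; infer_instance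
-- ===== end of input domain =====

-- B changes the grouping strategy (count stems, then collect each qualifying group by a scan
-- over the (stem, item) pairs) but keeps the same values; equivalence is exact on Pre_.

-- ===== PORT A =====
-- PREPS, shared verbatim by both Pythons
def pvPREPS : List String := ["_FROM", "_WITH", "_VIA", "_IN", "_AT", "_ON", "_FOR", "_TO", "_BY"]

-- the 'for prep in PREPS: if rt.endswith(prep): stem = rt[:-len(prep)]; break' loop,
-- identical in A and in B's stem_of helper (early return = break)
def pvStemScan (rt : String) : List String → String
  | [] => rt
  | p :: rest =>
      if PySem.Str.endswith rt p then PySem.Str.slice rt none (some (-(p.length : Int)))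
      else pvStemScan rt rest

def analyze_verb_roots (rel_types : List (List (String × String))) : List (String × List (List (String × String))) :=
  let groups := rel_types.foldl (fun d item =>
      -- item["rel_type"]: first-match lookup; missing key (KeyError) is outside Pre_, "" there
      let rt := (item.lookup "rel_type").getD ""
      let stem := pvStemScan rt pvPREPS
      d.modify stem [] (fun v => v ++ [item])) PySem.Dict.empty
  groups.items.filter (fun kv => decide (1 < kv.2.length))

-- ===== PORT B =====
-- B's stem_of helper
def pvStemOf (rt : String) : String := pvStemScan rt pvPREPS

def analyze_verb_roots_alt (rel_types : List (List (String × String))) : List (String × List (List (String × String))) :=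
  let stems := rel_types.map (fun item => pvStemOf ((item.lookup "rel_type").getD ""))
  let result := stems.foldl (fun r s =>
      if !r.contains s && decide (1 < PySem.List.count stems s) then
        r.insert s (((stems.zip rel_types).filter (fun p => p.1 == s)).map (fun p => p.2))
      else r) PySem.Dict.empty
  result.items

-- ===== PRECONDITION & SPEC =====
-- Pre_ excludes items missing the "rel_type" key (Python raises KeyError there) and, since the
-- Lean type admits what a Python dict cannot, items whose association list repeats a key.
def Pre_analyze_verb_roots (rel_types : List (List (String × String))) : Prop :=
  ∀ item ∈ rel_types, (item.map Prod.fst).Nodup ∧ (item.lookup "rel_type").isSome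
instance (rel_types : List (List (String × String))) : Decidable (Pre_analyze_verb_roots rel_types) := by unfold Pre_analyze_verb_roots; infer_instance

def pvWitness_analyze_verb_roots : (List (List (String × String))) :=
  [[("rel_type", "ISSUED_BY"), ("n", "3")], [("rel_type", "ISSUED_TO")], [("rel_type", "CITES")]]

def Spec_analyze_verb_roots (rel_types : List (List (String × String))) (out : List (String × List (List (String × String)))) : Prop := out = analyze_verb_roots_alt rel_types
instance (rel_types : List (List (String × String))) (out : List (String × List (List (String × String)))) : Decidable (Spec_analyze_verb_roots rel_types out) := by unfold Spec_analyze_verb_roots; infer_instance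

-- ===== CLAIM (what is proved, stated in full; the proofs are below) =====
def Claim_equal_analyze_verb_roots : Prop := ∀ (rel_types : List (List (String × String))), Dom_analyze_verb_roots rel_types → Pre_analyze_verb_roots rel_types → Spec_analyze_verb_roots rel_types (analyze_verb_roots rel_types)

-- ===== LEMMAS AND PROOFS =====

-- the stem of an item, as both ports compute it
def pvKey (item : List (String × String)) : String :=
  pvStemScan ((item.lookup "rel_type").getD "") pvPREPS

-- B's guarded-insert loop in closed form
theorem pvFoldInsertItems {V : Type} (P : String → Bool) (g : String → V) :
    ∀ (l : List String) (r : PySem.Dict String V),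
      (l.foldl (fun r s => if !r.contains s && P s then r.insert s (g s) else r) r).items
      = r.items ++ ((PySem.Set.ofList l).filter (fun s => !r.contains s && P s)).map (fun s => (s, g s)) := by
  intro l
  induction l with
  | nil => intro r; simp [PySem.Set.ofList]
  | cons s t ih =>
    intro r
    by_cases hc : (!r.contains s && P s) = true
    · have hnc : r.contains s = false := by
        cases h : r.contains s <;> simp [h] at hc ⊢
      rw [List.foldl_cons, if_pos hc, ih, PySem.Dict.items_insert_of_not_contains _ _ hnc,
        PySem.Set.ofList_cons]
      have hcons : List.filter (fun x => !r.contains x && P x)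
            (s :: (PySem.Set.ofList t).discard s)
          = s :: List.filter (fun x => !r.contains x && P x) ((PySem.Set.ofList t).discard s) := by
        simp [hc]
      have hfilt : ((PySem.Set.ofList t).discard s).filter (fun x => !r.contains x && P x)
          = (PySem.Set.ofList t).filter
              (fun x => !(PySem.Dict.insert r s (g s)).contains x && P x) := by
        simp only [PySem.Set.discard, List.filter_filter]
        apply List.filter_congr
        intro x _
        rw [PySem.Dict.contains_insert]
        cases hx : x == s <;> simp_all
      rw [hcons, hfilt]
      simp
    · have hcf : (!r.contains s && P s) = false := by
        cases h : (!r.contains s && P s) <;> simp_all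
      rw [List.foldl_cons, if_neg (by simp [hcf]), ih, PySem.Set.ofList_cons,
        List.filter_cons_of_neg (by simp [hcf])]
      congr 2
      simp only [PySem.Set.discard, List.filter_filter]
      apply List.filter_congr
      intro x _
      cases hx : x == s
      · simp
      · have : x = s := by simpa using hx
        subst this
        simp [hcf]

-- A's grouping, characterized
theorem pvA_char (rel_types : List (List (String × String))) :
    analyze_verb_roots rel_types
      = ((PySem.Set.ofList (rel_types.map pvKey)).map
          (fun s => (s, rel_types.filter (fun it => pvKey it == s)))).filter
          (fun kv => decide (1 < kv.2.length)) := by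
  unfold analyze_verb_roots
  have hbody : (fun (d : PySem.Dict String (List (List (String × String)))) item =>
        d.modify (pvStemScan ((item.lookup "rel_type").getD "") pvPREPS) []
          (fun v => v ++ [item]))
      = fun d item => d.modify (pvKey item) [] (fun v => v ++ [item]) := by
    funext d item; rfl
  simp only [hbody]
  have hkeys : (rel_types.foldl (fun d item => d.modify (pvKey item) [] (fun v => v ++ [item]))
      PySem.Dict.empty).keys = PySem.Set.ofList (rel_types.map pvKey) := by
    rw [PySem.Dict.keys_foldl_modify_key rel_types pvKey [] (fun _ item v => v ++ [item])]
    simp [PySem.Set.update_nil_left, PySem.Dict.keys_empty]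
  have hnd : (rel_types.foldl (fun d item => d.modify (pvKey item) [] (fun v => v ++ [item]))
      PySem.Dict.empty).keys.Nodup := by
    rw [hkeys]; exact PySem.Set.nodup_ofList _
  rw [PySem.Dict.items_eq_map_keys _ hnd [], hkeys]
  congr 1
  apply List.map_congr_left
  intro s _
  have hfold : rel_types.foldl (fun d item => d.modify (pvKey item) [] (fun v => v ++ [item]))
        PySem.Dict.empty
      = (rel_types.map (fun it => (pvKey it, it))).foldl
          (fun d p => d.modify p.1 [] (fun v => v ++ [p.2])) PySem.Dict.empty := by
    rw [List.foldl_map]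
  rw [hfold, PySem.Dict.getD_foldl_modify_append]
  simp [PySem.Dict.getD_empty, List.filter_map, Function.comp_def]

-- the zipped pairs B scans are exactly the (key, item) pairs
theorem pvZipPairs (rel_types : List (List (String × String))) :
    (rel_types.map pvKey).zip rel_types = rel_types.map (fun it => (pvKey it, it)) := by
  induction rel_types with
  | nil => rfl
  | cons a t ih => simp [ih]

-- a group's length is its stem's count
theorem pvCountLen (rel_types : List (List (String × String))) (s : String) :
    (rel_types.filter (fun it => pvKey it == s)).length = (rel_types.map pvKey).count s := by
  rw [← List.countP_eq_length_filter, List.count_eq_countP, List.countP_map]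
  rfl

-- ===== VERDICT (by name: the statement is the Claim_ definition above) =====
theorem analyze_verb_roots_spec : Claim_equal_analyze_verb_roots := by
  intro rel_types _ _
  unfold Spec_analyze_verb_roots analyze_verb_roots_alt
  have hstems : rel_types.map (fun item => pvStemOf ((item.lookup "rel_type").getD ""))
      = rel_types.map pvKey := by
    apply List.map_congr_left; intro it _; rfl
  simp only [hstems]
  rw [pvFoldInsertItems
        (P := fun s => decide (1 < PySem.List.count (rel_types.map pvKey) s))
        (g := fun s => (((rel_types.map pvKey).zip rel_types).filter (fun p => p.1 == s)).map
          (fun p => p.2))]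
  rw [pvA_char, List.filter_map]
  have hf : (PySem.Set.ofList (rel_types.map pvKey)).filter
        ((fun kv => decide (1 < kv.2.length)) ∘
          (fun s => (s, rel_types.filter (fun it => pvKey it == s))))
      = (PySem.Set.ofList (rel_types.map pvKey)).filter
        (fun s => !(PySem.Dict.empty : PySem.Dict String (List (List (String × String)))).contains s && decide (1 < PySem.List.count (rel_types.map pvKey) s)) := by
    apply List.filter_congr
    intro s _
    simp [pvCountLen, PySem.List.count_eq, PySem.Dict.contains_empty]
  rw [hf]
  have hemp : (PySem.Dict.empty : PySem.Dict String (List (List (String × String)))).items = [] := rfl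
  rw [hemp, List.nil_append]
  apply List.map_congr_left
  intro s _
  rw [pvZipPairs]
  simp [List.filter_map, Function.comp_def]
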